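-- pv_equiv track=rewrite | github.com/RAgassi5/BGU_Projects | Python/hw3/HW3 (1).py | remove_digits
-- ===== SOURCE A (Python) =====
-- def remove_digits(text):
--     """
--     this function receives any text, if the text includes digits the function removes them
--     :param text: any string with or without digits
--     :return: the same input string without the digits
--     """
--     my_str = ""
--     digits_lst = ["0", "1", "2", "3", "4", "5", "6", "7", "8", "9"]
--     for letter in text:
--         if letter not in digits_lst:  ## might need to add the space at the end , like the pdf
--             my_str = my_str + letter
--         elif letter in digits_lst:
--             my_str = my_str + ""
--         else:
--             return text
--     return my_str
-- ===== SOURCE B (Python) =====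
-- _DEL_DIGITS = str.maketrans('', '', '0123456789')
--
-- def remove_digits(text):
--     return text.translate(_DEL_DIGITS)
-- ===== Notes on version B (the rewrite author's own statement) =====
-- stated objective: faster
-- what changed: Replaces the explicit character loop with list-membership tests and quadratic repeated string concatenation by a precomputed str.maketrans deletion table applied in one C-level translate pass.
import Mathlib
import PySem

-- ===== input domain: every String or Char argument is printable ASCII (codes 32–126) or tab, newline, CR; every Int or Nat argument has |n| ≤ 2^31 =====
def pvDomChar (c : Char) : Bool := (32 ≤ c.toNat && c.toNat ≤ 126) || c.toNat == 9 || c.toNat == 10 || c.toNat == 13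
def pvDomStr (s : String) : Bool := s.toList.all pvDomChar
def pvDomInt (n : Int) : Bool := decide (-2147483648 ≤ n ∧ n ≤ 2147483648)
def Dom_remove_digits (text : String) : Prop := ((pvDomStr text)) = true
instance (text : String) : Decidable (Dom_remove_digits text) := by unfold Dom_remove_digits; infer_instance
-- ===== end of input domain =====

-- B replaces A's per-character loop (membership test + string concatenation) by a
-- precomputed str.maketrans deletion table applied in a single translate pass (idiomatic).


-- ===== PORT A =====
-- A iterates the characters, appending each non-digit to an accumulator string;
-- the 'elif' branch appends the empty string (a no-op); the final 'else' is unreachable.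
def remove_digits (text : String) : String :=
  let digits_lst : List Char := ['0', '1', '2', '3', '4', '5', '6', '7', '8', '9']
  text.toList.foldl
    (fun my_str letter =>
      if ¬ digits_lst.contains letter then my_str.push letter
      else my_str ++ "")  -- 'elif letter in digits_lst: my_str = my_str + ""'
    ""

-- ===== PORT B =====
-- the deletion table built by str.maketrans('', '', '0123456789')
def pvDelTable : List Char := "0123456789".toList
-- str.translate with a deletion table keeps exactly the characters not in the table
def remove_digits_alt (text : String) : String :=
  String.ofList (text.toList.filter (fun c => !pvDelTable.contains c))

-- ===== PRECONDITION & SPEC =====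
def Spec_remove_digits (text : String) (out : String) : Prop := out = remove_digits_alt text
instance (text : String) (out : String) : Decidable (Spec_remove_digits text out) := by unfold Spec_remove_digits; infer_instance

-- ===== CLAIM (what is proved, stated in full; the proofs are below) =====
def Claim_equal_remove_digits : Prop := ∀ (text : String), Dom_remove_digits text → Spec_remove_digits text (remove_digits text)

-- ===== LEMMAS AND PROOFS =====
theorem remove_digits_foldl_data (l : List Char) (s : String) :
    (l.foldl
      (fun my_str letter =>
        if ¬ (['0','1','2','3','4','5','6','7','8','9'] : List Char).contains letter
        then my_str.push letter else my_str ++ "") s).toList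
    = s.toList ++ l.filter (fun c => !pvDelTable.contains c) := by
  have htab : pvDelTable = ['0','1','2','3','4','5','6','7','8','9'] := by decide
  induction l generalizing s with
  | nil => simp
  | cons c l ih =>
    rw [List.foldl_cons, List.filter_cons]
    by_cases h : (['0','1','2','3','4','5','6','7','8','9'] : List Char).contains c = true
    · have hp : (!pvDelTable.contains c) = false := by rw [htab, h]; rfl
      rw [if_neg (not_not_intro h), hp, if_neg (by simp), String.append_empty]
      exact ih s
    · have hc : (['0','1','2','3','4','5','6','7','8','9'] : List Char).contains c = false :=
        eq_false_of_ne_true h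
      have hp : (!pvDelTable.contains c) = true := by rw [htab, hc]; rfl
      rw [if_pos h, hp, if_pos rfl, ih (s.push c), String.toList_push,
        List.append_assoc, List.singleton_append]

-- ===== VERDICT (by name: the statement is the Claim_ definition above) =====
theorem remove_digits_spec : Claim_equal_remove_digits := by
  intro text _
  show remove_digits text = remove_digits_alt text
  have h := remove_digits_foldl_data text.toList ""
  apply String.ext
  show (remove_digits text).toList = (remove_digits_alt text).toList
  unfold remove_digits remove_digits_alt
  simpa only [String.toList_ofList, List.nil_append] using h
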